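-- pv_equiv track=rewrite | github.com/dumetum/pythonkurs | Loesungen/08A_uebung_funktion_wortlaenge/satz.py | berechne_max_wortlaenge
-- ===== SOURCE A (Python) =====
-- def berechne_max_wortlaenge(satz):
--     aktuelle_laenge = 0
--     maximale_laenge = 0
--
--     for zeichen in satz:
--         if zeichen == " ":
--             if aktuelle_laenge > maximale_laenge:
--                 maximale_laenge = aktuelle_laenge
--             aktuelle_laenge = 0
--         else:
--             aktuelle_laenge += 1
--
--     if aktuelle_laenge > maximale_laenge:
--         maximale_laenge = aktuelle_laenge
--
--     return maximale_laenge
-- ===== SOURCE B (Python) =====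
-- def berechne_max_wortlaenge(satz):
--     return max((len(wort) for wort in satz.split(" ")), default=0)
-- ===== Notes on version B (the rewrite author's own statement) =====
-- stated objective: simpler
-- what changed: Replaces the character-by-character run-length state machine (current run + running max + final flush) with a one-liner: split the sentence on single spaces and take the max of the token lengths (default 0).
import Mathlib
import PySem

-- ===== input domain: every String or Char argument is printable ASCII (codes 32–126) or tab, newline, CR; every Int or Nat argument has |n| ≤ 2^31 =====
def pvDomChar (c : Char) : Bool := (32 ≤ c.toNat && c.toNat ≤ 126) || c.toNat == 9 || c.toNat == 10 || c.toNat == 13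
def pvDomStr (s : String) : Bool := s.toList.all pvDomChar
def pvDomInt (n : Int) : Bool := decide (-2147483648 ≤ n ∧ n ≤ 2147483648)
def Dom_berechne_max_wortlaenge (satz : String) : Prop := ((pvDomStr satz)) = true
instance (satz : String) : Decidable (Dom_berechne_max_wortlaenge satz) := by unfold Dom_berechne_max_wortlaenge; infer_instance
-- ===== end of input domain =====

-- B replaces A's character-by-character run-length state machine with split(" ") + max of token lengths (objective: simpler).

-- ===== PORT A =====
-- state = (aktuelle_laenge, maximale_laenge); the for-loop is a foldl over the characters
def berechne_max_wortlaenge (satz : String) : Int :=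
  let st := satz.toList.foldl
    (fun (p : Int × Int) zeichen =>
      if zeichen = ' ' then (0, if p.1 > p.2 then p.1 else p.2)
      else (p.1 + 1, p.2))
    (0, 0)
  if st.1 > st.2 then st.1 else st.2

-- ===== PORT B =====
-- satz.split(" ") → PySem.Str.split?; sep " " ≠ "" so it always returns some (getD [] is never taken)
def berechne_max_wortlaenge_alt (satz : String) : Int :=
  let words := (PySem.Str.split? satz " ").getD []
  (PySem.List.max? (words.map PySem.Str.len) id).getD 0

-- ===== PRECONDITION & SPEC =====
def Spec_berechne_max_wortlaenge (satz : String) (out : Int) : Prop := out = berechne_max_wortlaenge_alt satz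
instance (satz : String) (out : Int) : Decidable (Spec_berechne_max_wortlaenge satz out) := by unfold Spec_berechne_max_wortlaenge; infer_instance

-- ===== CLAIM (what is proved, stated in full; the proofs are below) =====
def Claim_equal_berechne_max_wortlaenge : Prop := ∀ (satz : String), Dom_berechne_max_wortlaenge satz → Spec_berechne_max_wortlaenge satz (berechne_max_wortlaenge satz)

-- ===== LEMMAS AND PROOFS =====

-- simple structural recursion computing (first word, remaining words) of a split on ' '
def pvSplit1 : List Char → List Char × List (List Char)
  | [] => ([], [])
  | c :: cs =>
    let p := pvSplit1 cs
    if c = ' ' then ([], p.1 :: p.2) else (c :: p.1, p.2)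

lemma pvGo_eq (cs : List Char) : ∀ (n : Nat) (cur : List Char) (acc : List (List Char)),
    cs.length ≤ n →
    PySem.Chars.splitOn.go [' '] (n + 1) cs cur acc
      = acc.reverse ++ ((cur.reverse ++ (pvSplit1 cs).1) :: (pvSplit1 cs).2) := by
  induction cs with
  | nil =>
    intro n cur acc _
    rw [PySem.Chars.splitOn.go.eq_def]
    simp [pvSplit1]
  | cons c cs ih =>
    intro n cur acc hn
    simp only [List.length_cons] at hn
    obtain ⟨m, rfl⟩ : ∃ m, n = m + 1 := ⟨n - 1, by omega⟩
    rw [PySem.Chars.splitOn.go.eq_def]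
    by_cases hc : c = ' '
    · subst hc
      simp only [List.isPrefixOf, List.length_singleton, List.drop_one, List.tail_cons,
        pvSplit1]
      rw [if_pos (by simp)]
      rw [ih m [] (cur.reverse :: acc) (by omega)]
      simp
    · have hc' : ' ' ≠ c := fun h => hc h.symm
      have hpf : [' '].isPrefixOf (c :: cs) = false := by
        simp [List.isPrefixOf, hc']
      simp only [hpf, Bool.false_eq_true, if_false]
      rw [ih m (c :: cur) acc (by omega)]
      simp [pvSplit1, hc]

lemma pvSplitOn_eq (cs : List Char) :
    PySem.Chars.splitOn cs [' '] = (pvSplit1 cs).1 :: (pvSplit1 cs).2 := by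
  unfold PySem.Chars.splitOn
  simpa using pvGo_eq cs cs.length [] [] (le_refl _)

-- value of Python max over a nonempty Int list equals foldl max
lemma pvMax?_aux (f : Option Int → Int → Option Int)
    (hf : ∀ m x, f (some m) x = some (max m x)) :
    ∀ (xs : List Int) (m : Int), List.foldl f (some m) xs = some (xs.foldl max m) := by
  intro xs
  induction xs with
  | nil => intro m; rfl
  | cons x xs ih =>
    intro m
    rw [List.foldl_cons, hf, ih (max m x), List.foldl_cons]

lemma pvMax?_val (x : Int) (xs : List Int) :
    PySem.List.max? (x :: xs) id = some (xs.foldl max x) := by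
  unfold PySem.List.max?
  rw [List.foldl_cons]
  refine pvMax?_aux _ (fun m y => ?_) xs x
  show (if id m < id y then some y else some m) = some (max m y)
  simp only [id]
  split_ifs with h
  · rw [max_eq_right h.le]
  · rw [max_eq_left (not_lt.1 h)]

-- the A-side loop computes max(m, a + |first word|, |other words|…)
lemma pvLoop_eq (cs : List Char) : ∀ (a m : Int),
    (if ((cs.foldl
        (fun (p : Int × Int) zeichen =>
          if zeichen = ' ' then (0, if p.1 > p.2 then p.1 else p.2)
          else (p.1 + 1, p.2)) (a, m))).1 >
        ((cs.foldl
        (fun (p : Int × Int) zeichen =>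
          if zeichen = ' ' then (0, if p.1 > p.2 then p.1 else p.2)
          else (p.1 + 1, p.2)) (a, m))).2
      then ((cs.foldl
        (fun (p : Int × Int) zeichen =>
          if zeichen = ' ' then (0, if p.1 > p.2 then p.1 else p.2)
          else (p.1 + 1, p.2)) (a, m))).1
      else ((cs.foldl
        (fun (p : Int × Int) zeichen =>
          if zeichen = ' ' then (0, if p.1 > p.2 then p.1 else p.2)
          else (p.1 + 1, p.2)) (a, m))).2)
    = (((pvSplit1 cs).2.map (fun w => (w.length : Int))).foldl max
        (max m (a + ((pvSplit1 cs).1.length : Int)))) := by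
  induction cs with
  | nil =>
    intro a m
    simp only [List.foldl_nil, pvSplit1, List.map_nil, List.length_nil, Int.natCast_zero,
      add_zero]
    split_ifs with h <;> omega
  | cons c cs ih =>
    intro a m
    by_cases hc : c = ' '
    · subst hc
      simp only [List.foldl_cons, pvSplit1, reduceIte, List.map_cons]
      rw [ih 0 (if a > m then a else m)]
      congr 1
      simp only [List.length_nil, Nat.cast_zero, add_zero, zero_add]
      split_ifs with h <;> omega
    · simp only [List.foldl_cons, pvSplit1, if_neg hc]
      rw [ih (a + 1) m]
      congr 2
      simp only [List.length_cons]
      push_cast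
      ring

-- ===== VERDICT (by name: the statement is the Claim_ definition above) =====
theorem berechne_max_wortlaenge_spec : Claim_equal_berechne_max_wortlaenge := by
  intro satz _
  unfold Spec_berechne_max_wortlaenge berechne_max_wortlaenge berechne_max_wortlaenge_alt
  simp only [PySem.Str.split?, PySem.Chars.split?]
  rw [show (" ").toList = [' '] from rfl]
  simp only [List.isEmpty_cons, Bool.false_eq_true, if_false, Option.map_some, Option.getD_some]
  rw [pvSplitOn_eq]
  simp only [List.map_cons, List.map_map]
  rw [pvMax?_val, Option.getD_some]
  have hA := pvLoop_eq satz.toList 0 0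
  rw [hA]
  have h1 : max (0 : Int) (0 + ((pvSplit1 satz.toList).1.length : Int))
      = ((pvSplit1 satz.toList).1.length : Int) := by omega
  rw [h1]
  have h2 : PySem.Str.len (String.ofList (pvSplit1 satz.toList).1)
      = ((pvSplit1 satz.toList).1.length : Int) := by simp [PySem.Str.len]
  rw [h2]
  congr 1
  simp [PySem.Str.len, Function.comp_def]
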